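-- pv_equiv track=rewrite | github.com/GuanshiyinPusa/COMP10001 | Project1/question-2.py | assign_pony_to_path
-- ===== SOURCE A (Python) =====
-- def closest_greater_or_equal_number(arr, target):
--     closest_tuple = None
--     min_diff = None
--     for tup in arr:
--         if tup[0] + tup[1] < target:
--             continue
--         diff = abs(tup[0] + tup[1] - target)
--         if not closest_tuple or diff < min_diff:
--             min_diff = diff
--             closest_tuple = tup
--     return closest_tuple
--
-- def assign_pony_to_path(elevations, path, capacities):
--     final_elevation = [elevations[x][y] for x, y in path]
--     distance = [(final_elevation[i + 1] - final_elevation[i])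
--                 for i in range(len(final_elevation) - 1)]
--     ans_capacity = []
--     for m in distance:
--         possible_capacities = [(capacities[i], capacities[j]) for i in range(len(capacities)) for j in
--                                range(i, len(capacities))]
--         ans_capacity.append(closest_greater_or_equal_number(possible_capacities, m))
--     return ans_capacity
-- ===== SOURCE B (Python) =====
-- def _first_at_least(pairs, sums, target):
--     lo, hi = 0, len(sums)
--     while lo < hi:
--         mid = (lo + hi) // 2
--         if sums[mid] < target:
--             lo = mid + 1
--         else:
--             hi = mid
--     return pairs[lo] if lo < len(pairs) else None
--
--
-- def assign_pony_to_path(elevations, path, capacities):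
--     final = [elevations[x][y] for x, y in path]
--     pairs = sorted([(capacities[i], capacities[j])
--                     for i in range(len(capacities))
--                     for j in range(i, len(capacities))],
--                    key=lambda t: t[0] + t[1])
--     sums = [a + b for a, b in pairs]
--     return [_first_at_least(pairs, sums, b - a)
--             for a, b in zip(final, final[1:])]
-- ===== Notes on version B (the rewrite author's own statement) =====
-- stated objective: faster
-- what changed: B builds the O(C^2) capacity-pair list once, sorts it stably by pair sum and binary-searches the sorted sums for each elevation delta (stable sort preserves A's first-in-enumeration tie-breaking), instead of A's rebuilding the whole pair list and min-scanning it for every path step.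
import Mathlib
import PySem

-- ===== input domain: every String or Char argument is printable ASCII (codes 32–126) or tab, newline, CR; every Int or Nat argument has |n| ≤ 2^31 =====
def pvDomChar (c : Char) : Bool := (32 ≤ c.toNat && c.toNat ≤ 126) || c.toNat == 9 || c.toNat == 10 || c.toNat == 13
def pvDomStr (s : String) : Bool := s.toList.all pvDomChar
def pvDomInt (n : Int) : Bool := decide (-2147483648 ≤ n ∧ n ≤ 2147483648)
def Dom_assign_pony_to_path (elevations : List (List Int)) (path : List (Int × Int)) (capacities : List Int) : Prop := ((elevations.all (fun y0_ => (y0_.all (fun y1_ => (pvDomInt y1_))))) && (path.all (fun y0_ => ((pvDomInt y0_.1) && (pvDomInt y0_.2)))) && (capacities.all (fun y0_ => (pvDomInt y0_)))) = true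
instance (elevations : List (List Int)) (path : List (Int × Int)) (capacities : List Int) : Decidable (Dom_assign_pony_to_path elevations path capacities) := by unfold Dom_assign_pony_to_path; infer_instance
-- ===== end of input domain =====

-- B builds the capacity-pair list ONCE, sorts it by pair sum and binary-searches the sorted
-- sums for each elevation delta, instead of A's rebuilding all O(C^2) pairs and min-scanning
-- them for every path step (objective: faster).

-- ===== PORT A =====
-- Python's closest_greater_or_equal_number: a scan keeping (closest_tuple, min_diff).
-- The (some ct, none) state is unreachable in the Python loop (min_diff is set together
-- with closest_tuple); it is carried unchanged here.
def closest_greater_or_equal_number (arr : List (Int × Int)) (target : Int) : Option (Int × Int) :=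
  (arr.foldl
    (fun st tup =>
      if tup.1 + tup.2 < target then st
      else
        let diff := |tup.1 + tup.2 - target|
        match st with
        | (none, _) => (some tup, some diff)
        | (some ct, some md) =>
            if diff < md then (some tup, some diff) else (some ct, some md)
        | (some ct, none) => (some ct, none))
    ((none : Option (Int × Int)), (none : Option Int))).1

def assign_pony_to_path (elevations : List (List Int)) (path : List (Int × Int)) (capacities : List Int) : List (Option (Int × Int)) :=
  let final_elevation := path.map (fun xy =>
    PySem.List.pyGetD (PySem.List.pyGetD elevations xy.1 []) xy.2 0)
  let distance := (PySem.List.pyRange 0 ((final_elevation.length : Int) - 1)).map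
    (fun i => PySem.List.pyGetD final_elevation (i + 1) 0 - PySem.List.pyGetD final_elevation i 0)
  distance.foldl
    (fun ans m =>
      let possible_capacities :=
        (PySem.List.pyRange 0 (capacities.length : Int)).flatMap
          (fun i => (PySem.List.pyRange i (capacities.length : Int)).map
            (fun j => (PySem.List.pyGetD capacities i 0, PySem.List.pyGetD capacities j 0)))
      ans ++ [closest_greater_or_equal_number possible_capacities m])
    []

-- ===== PORT B =====
-- Source B's hand-written lower-bound binary search (the while loop of _first_at_least), ported
-- step for step; the fuel argument only bounds the number of loop iterations (hi - lo strictly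
-- decreases each iteration, so fuel = sums.length + 1 is never exhausted).
def pvBisectLoop (sums : List Int) (target : Int) : Nat → Int → Int → Int
  | 0, lo, _ => lo
  | fuel + 1, lo, hi =>
    if lo < hi then
      let mid := PySem.Int.floordiv (lo + hi) 2
      if PySem.List.pyGetD sums mid 0 < target then
        pvBisectLoop sums target fuel (mid + 1) hi
      else
        pvBisectLoop sums target fuel lo mid
    else lo

-- Source B's _first_at_least
def pvFirstAtLeast (pairs : List (Int × Int)) (sums : List Int) (target : Int) : Option (Int × Int) :=
  let lo := pvBisectLoop sums target (sums.length + 1) 0 (sums.length : Int)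
  if lo < (pairs.length : Int) then some (PySem.List.pyGetD pairs lo (0, 0)) else none

def assign_pony_to_path_alt (elevations : List (List Int)) (path : List (Int × Int)) (capacities : List Int) : List (Option (Int × Int)) :=
  let final := path.map (fun xy =>
    PySem.List.pyGetD (PySem.List.pyGetD elevations xy.1 []) xy.2 0)
  let pairs := PySem.List.sorted
    ((PySem.List.pyRange 0 (capacities.length : Int)).flatMap
      (fun i => (PySem.List.pyRange i (capacities.length : Int)).map
        (fun j => (PySem.List.pyGetD capacities i 0, PySem.List.pyGetD capacities j 0))))
    (fun t => t.1 + t.2)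
  let sums := pairs.map (fun ab => ab.1 + ab.2)
  (final.zip (PySem.List.slice final (some 1) none)).map
    (fun ab => pvFirstAtLeast pairs sums (ab.2 - ab.1))

-- ===== PRECONDITION & SPEC =====
-- Pre_ excludes exactly the inputs where Python A raises an IndexError: a path step whose
-- (x, y) does not index into elevations (Python negative-index rules included).
def Pre_assign_pony_to_path (elevations : List (List Int)) (path : List (Int × Int)) (capacities : List Int) : Prop :=
  ∀ p ∈ path, ((PySem.List.pyGet? elevations p.1).bind (fun row => PySem.List.pyGet? row p.2)).isSome = true
instance (elevations : List (List Int)) (path : List (Int × Int)) (capacities : List Int) : Decidable (Pre_assign_pony_to_path elevations path capacities) := by unfold Pre_assign_pony_to_path; infer_instance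

def pvWitness_assign_pony_to_path : List (List Int) × (List (Int × Int)) × List Int :=
  ([[3, 1], [2, 5]], [(0, 0), (1, 1), (-1, 0)], [1, 2, 3])

def Spec_assign_pony_to_path (elevations : List (List Int)) (path : List (Int × Int)) (capacities : List Int) (out : List (Option (Int × Int))) : Prop := out = assign_pony_to_path_alt elevations path capacities
instance (elevations : List (List Int)) (path : List (Int × Int)) (capacities : List Int) (out : List (Option (Int × Int))) : Decidable (Spec_assign_pony_to_path elevations path capacities out) := by unfold Spec_assign_pony_to_path; infer_instance

-- ===== CLAIM (what is proved, stated in full; the proofs are below) =====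
def Claim_equal_assign_pony_to_path : Prop := ∀ (elevations : List (List Int)) (path : List (Int × Int)) (capacities : List Int), Dom_assign_pony_to_path elevations path capacities → Pre_assign_pony_to_path elevations path capacities → Spec_assign_pony_to_path elevations path capacities (assign_pony_to_path elevations path capacities)

-- ===== LEMMAS AND PROOFS =====

-- A's scan, restated without the redundant min_diff component.
def pvBetter (m : Int) (b : Option (Int × Int)) (t : Int × Int) : Option (Int × Int) :=
  if t.1 + t.2 < m then b
  else match b with
    | none => some t
    | some c => if t.1 + t.2 < c.1 + c.2 then some t else some c

theorem pv_closest_aux (m : Int) (L : List (Int × Int)) :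
    ∀ st : Option (Int × Int) × Option Int,
    (st = (none, none) ∨ ∃ c, st = (some c, some (c.1 + c.2 - m)) ∧ m ≤ c.1 + c.2) →
    (L.foldl
      (fun st tup =>
        if tup.1 + tup.2 < m then st
        else
          let diff := |tup.1 + tup.2 - m|
          match st with
          | (none, _) => (some tup, some diff)
          | (some ct, some md) =>
              if diff < md then (some tup, some diff) else (some ct, some md)
          | (some ct, none) => (some ct, none))
      st).1 = L.foldl (pvBetter m) st.1 := by
  induction L with
  | nil => intro st _; rfl
  | cons t L ih =>
    intro st hst
    simp only [List.foldl_cons]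
    by_cases hlt : t.1 + t.2 < m
    · have hb : pvBetter m st.1 t = st.1 := by simp [pvBetter, hlt]
      rw [if_pos hlt, hb]
      exact ih st hst
    · have habs : |t.1 + t.2 - m| = t.1 + t.2 - m := abs_of_nonneg (by omega)
      rcases hst with h0 | ⟨c, hc, hcm⟩
      · subst h0
        rw [if_neg hlt]
        have hb : pvBetter m (none, (none : Option Int)).1 t = some t := by
          simp [pvBetter, hlt]
        rw [hb]
        have := ih (some t, some |t.1 + t.2 - m|) (Or.inr ⟨t, by rw [habs], by omega⟩)
        simpa using this
      · subst hc
        rw [if_neg hlt]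
        simp only [habs]
        by_cases hcmp : t.1 + t.2 - m < c.1 + c.2 - m
        · have hb : pvBetter m (some c) t = some t := by
            simp [pvBetter, hlt]; omega
          rw [if_pos hcmp]
          have := ih (some t, some (t.1 + t.2 - m)) (Or.inr ⟨t, rfl, by omega⟩)
          simpa [hb] using this
        · have hb : pvBetter m (some c) t = some c := by
            simp [pvBetter, hlt]; omega
          rw [if_neg hcmp]
          have := ih (some c, some (c.1 + c.2 - m)) (Or.inr ⟨c, rfl, hcm⟩)
          simpa [hb] using this

theorem pv_closest_eq_foldl (L : List (Int × Int)) (m : Int) :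
    closest_greater_or_equal_number L m = L.foldl (pvBetter m) none := by
  unfold closest_greater_or_equal_number
  exact pv_closest_aux m L (none, none) (Or.inl rfl)

theorem pv_insertBy_pairwise (x : Int × Int) (acc : List (Int × Int))
    (hs : acc.Pairwise (fun a b => a.1 + a.2 ≤ b.1 + b.2)) :
    (PySem.List.insertBy (fun a b => decide (a.1 + a.2 < b.1 + b.2)) x acc).Pairwise
      (fun a b => a.1 + a.2 ≤ b.1 + b.2) := by
  induction acc with
  | nil => simp [PySem.List.insertBy]
  | cons y ys ih =>
    rw [List.pairwise_cons] at hs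
    by_cases hxy : x.1 + x.2 < y.1 + y.2
    · simp only [PySem.List.insertBy, hxy, decide_true, if_true]
      refine List.Pairwise.cons ?_ (List.Pairwise.cons hs.1 hs.2)
      intro z hz
      rcases List.mem_cons.mp hz with rfl | hz
      · omega
      · have := hs.1 z hz; omega
    · simp only [PySem.List.insertBy, hxy, decide_false, Bool.false_eq_true, if_false]
      refine List.Pairwise.cons ?_ (ih hs.2)
      intro z hz
      rcases (PySem.List.mem_insertBy _ _ _ _).mp hz with rfl | hz
      · omega
      · exact hs.1 z hz

theorem pv_find_insertBy (m : Int) (x : Int × Int) (acc : List (Int × Int))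
    (hs : acc.Pairwise (fun a b => a.1 + a.2 ≤ b.1 + b.2)) :
    (PySem.List.insertBy (fun a b => decide (a.1 + a.2 < b.1 + b.2)) x acc).find?
        (fun t => decide (m ≤ t.1 + t.2))
      = pvBetter m (acc.find? (fun t => decide (m ≤ t.1 + t.2))) x := by
  induction acc with
  | nil =>
    by_cases hx : m ≤ x.1 + x.2 <;>
      simp [PySem.List.insertBy, pvBetter, List.find?, hx]
  | cons y ys ih =>
    rw [List.pairwise_cons] at hs
    by_cases hxy : x.1 + x.2 < y.1 + y.2
    · simp only [PySem.List.insertBy, hxy, decide_true, if_true]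
      by_cases hx : m ≤ x.1 + x.2
      · rw [List.find?_cons_of_pos (by simpa using hx)]
        -- every candidate in y :: ys has a strictly larger sum than x
        rcases hfy : (y :: ys).find? (fun t => decide (m ≤ t.1 + t.2)) with _ | c
        · simp only [pvBetter, hfy]
          rw [if_neg (by omega)]
        · have hcmem := List.mem_of_find?_eq_some hfy
          have hyc : y.1 + y.2 ≤ c.1 + c.2 := by
            rcases List.mem_cons.mp hcmem with rfl | hc
            · omega
            · exact hs.1 c hc
          simp only [pvBetter, hfy]
          rw [if_neg (by omega), if_pos (by omega)]
      · rw [List.find?_cons_of_neg (by simpa using hx)]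
        simp [pvBetter, show x.1 + x.2 < m by omega]
    · simp only [PySem.List.insertBy, hxy, decide_false, Bool.false_eq_true, if_false]
      by_cases hy : m ≤ y.1 + y.2
      · rw [List.find?_cons_of_pos (by simpa using hy),
            List.find?_cons_of_pos (by simpa using hy)]
        simp only [pvBetter]
        rw [if_neg (by omega), if_neg (by omega)]
      · rw [List.find?_cons_of_neg (by simpa using hy),
            List.find?_cons_of_neg (by simpa using hy)]
        exact ih hs.2

theorem pv_find_foldl (m : Int) (L : List (Int × Int)) :
    ∀ acc : List (Int × Int), acc.Pairwise (fun a b => a.1 + a.2 ≤ b.1 + b.2) →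
    (L.foldl (fun acc x => PySem.List.insertBy (fun a b => decide (a.1 + a.2 < b.1 + b.2)) x acc) acc).find?
        (fun t => decide (m ≤ t.1 + t.2))
      = L.foldl (pvBetter m) (acc.find? (fun t => decide (m ≤ t.1 + t.2))) := by
  induction L with
  | nil => intro acc _; rfl
  | cons x L ih =>
    intro acc hs
    simp only [List.foldl_cons]
    rw [ih _ (pv_insertBy_pairwise x acc hs), pv_find_insertBy m x acc hs]

theorem pv_find_sorted (m : Int) (L : List (Int × Int)) :
    (PySem.List.sorted L (fun t => t.1 + t.2)).find? (fun t => decide (m ≤ t.1 + t.2))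
      = closest_greater_or_equal_number L m := by
  rw [PySem.List.sorted_eq_foldl_insertBy, pv_find_foldl m L [] (List.Pairwise.nil),
    pv_closest_eq_foldl]
  rfl

theorem pv_dist_eq (f : List Int) :
    (PySem.List.pyRange 0 ((f.length : Int) - 1)).map
      (fun i => PySem.List.pyGetD f (i + 1) 0 - PySem.List.pyGetD f i 0)
    = (f.zip f.tail).map (fun ab => ab.2 - ab.1) := by
  apply List.ext_getElem
  · simp only [List.length_map, PySem.List.length_pyRange_one, List.length_zip,
      List.length_tail]
    omega
  · intro k h1 h2
    have hk : k + 1 < f.length := by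
      simp [PySem.List.length_pyRange_one] at h1
      omega
    rw [List.getElem_map, List.getElem_map, PySem.List.getElem_pyRange_one,
      List.getElem_zip]
    have e1 : (0 : Int) + (k : Int) + 1 = ((k + 1 : Nat) : Int) := by push_cast; ring
    have e0 : (0 : Int) + (k : Int) = ((k : Nat) : Int) := by ring
    rw [e1, e0, PySem.List.pyGetD_natCast, PySem.List.pyGetD_natCast]
    have hzk : k < (f.zip f.tail).length := by simpa using h2
    have hkf : k < f.length := by omega
    have hkt : k < f.tail.length := by simp [List.length_tail]; omega
    rw [List.getD_eq_getElem f 0 hkf, List.getD_eq_getElem f 0 hk, List.getElem_tail]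

theorem pvBisectLoop_spec (sums : List Int) (m : Int)
    (hmono : ∀ i j : Nat, i < j → j < sums.length → sums.getD i 0 ≤ sums.getD j 0) :
    ∀ (fuel : Nat) (lo hi : Int), 0 ≤ lo → lo ≤ hi → hi ≤ (sums.length : Int) →
    (hi - lo).toNat ≤ fuel →
    (∀ j : Nat, (j : Int) < lo → sums.getD j 0 < m) →
    (∀ j : Nat, hi ≤ (j : Int) → j < sums.length → m ≤ sums.getD j 0) →
    ∃ r : Nat, pvBisectLoop sums m fuel lo hi = (r : Int) ∧ r ≤ sums.length ∧
      (∀ j : Nat, j < r → sums.getD j 0 < m) ∧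
      (∀ j : Nat, r ≤ j → j < sums.length → m ≤ sums.getD j 0) := by
  intro fuel
  induction fuel with
  | zero =>
    intro lo hi h0 hlohi hhil hfuel hpre hsuf
    refine ⟨lo.toNat, by simp [pvBisectLoop]; omega, by omega, ?_, ?_⟩
    · intro j hj; exact hpre j (by omega)
    · intro j hj hjl; exact hsuf j (by omega) hjl
  | succ fuel ih =>
    intro lo hi h0 hlohi hhil hfuel hpre hsuf
    by_cases hlt : lo < hi
    · set mid := PySem.Int.floordiv (lo + hi) 2 with hmid
      have hmidlo : lo ≤ mid := (PySem.Int.floordiv_two_mid_bounds hlohi).1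
      have hmidhi : mid < hi :=
        (PySem.Int.floordiv_lt_iff_lt_mul (by norm_num)).mpr (by omega)
      have hmid0 : 0 ≤ mid := by omega
      have hmidlen : mid.toNat < sums.length := by omega
      rw [show pvBisectLoop sums m (fuel + 1) lo hi
          = (if PySem.List.pyGetD sums mid 0 < m then
              pvBisectLoop sums m fuel (mid + 1) hi
            else pvBisectLoop sums m fuel lo mid) by
        simp only [pvBisectLoop, hlt, if_true, ← hmid]]
      rw [PySem.List.pyGetD_of_nonneg sums 0 hmid0]
      by_cases hv : sums.getD mid.toNat 0 < m
      · rw [if_pos hv]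
        refine ih (mid + 1) hi (by omega) (by omega) hhil (by omega) ?_ hsuf
        intro j hj
        rcases Nat.lt_or_ge j mid.toNat with hjm | hjm
        · exact lt_of_le_of_lt (hmono j mid.toNat hjm hmidlen) hv
        · have : j = mid.toNat := by omega
          rw [this]; exact hv
      · rw [if_neg hv]
        rw [not_lt] at hv
        refine ih lo mid h0 (by omega) (by omega) (by omega) hpre ?_
        intro j hj hjl
        rcases Nat.lt_or_ge mid.toNat j with hjm | hjm
        · exact le_trans hv (hmono mid.toNat j hjm hjl)
        · have : j = mid.toNat := by omega
          rw [this]; exact hv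
    · refine ⟨lo.toNat, by simp [pvBisectLoop, hlt]; omega, by omega, ?_, ?_⟩
      · intro j hj; exact hpre j (by omega)
      · intro j hj hjl; exact hsuf j (by omega) hjl

theorem pv_find?_of_first (m : Int) :
    ∀ (S : List (Int × Int)) (r : Nat), r ≤ S.length →
    (∀ j : Nat, j < S.length → j < r →
      (S.getD j ((0 : Int), (0 : Int))).1 + (S.getD j ((0 : Int), (0 : Int))).2 < m) →
    (r < S.length →
      m ≤ (S.getD r ((0 : Int), (0 : Int))).1 + (S.getD r ((0 : Int), (0 : Int))).2) →
    S.find? (fun t => decide (m ≤ t.1 + t.2)) = S[r]? := by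
  intro S
  induction S with
  | nil => intro r _ _ _; simp
  | cons x T ih =>
    intro r hr hbelow habove
    cases r with
    | zero =>
      have hx : m ≤ x.1 + x.2 := by simpa using habove (by simp)
      rw [List.find?_cons_of_pos (by simpa using hx)]
      simp
    | succ s =>
      have hx : x.1 + x.2 < m := by
        simpa using hbelow 0 (by simp) (Nat.succ_pos s)
      rw [List.find?_cons_of_neg (by simpa using hx)]
      have := ih s (by simpa using hr)
        (fun j hj hjs => by simpa using hbelow (j + 1) (by simpa using hj) (by omega))
        (fun hs => by simpa using habove (by simpa using hs))
      simpa using this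

theorem pvFirstAtLeast_sorted (L : List (Int × Int)) (m : Int) :
    pvFirstAtLeast (PySem.List.sorted L (fun t => t.1 + t.2))
        ((PySem.List.sorted L (fun t => t.1 + t.2)).map (fun ab => ab.1 + ab.2)) m
      = closest_greater_or_equal_number L m := by
  set S := PySem.List.sorted L (fun t => t.1 + t.2) with hS
  set sums := S.map (fun ab => ab.1 + ab.2) with hsums
  have hlen : sums.length = S.length := by rw [hsums, List.length_map]
  have hgd : ∀ j : Nat, j < S.length →
      sums.getD j 0 = (S.getD j ((0 : Int), (0 : Int))).1 + (S.getD j ((0 : Int), (0 : Int))).2 := by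
    intro j hj
    have hj' : j < sums.length := by omega
    rw [List.getD_eq_getElem _ _ hj', List.getD_eq_getElem _ _ hj]
    simp only [hsums, List.getElem_map]
  have hmono : ∀ i j : Nat, i < j → j < sums.length → sums.getD i 0 ≤ sums.getD j 0 := by
    intro i j hij hj
    have hp := PySem.List.sorted_map_key_pairwise L (fun t => t.1 + t.2)
    rw [← hS, ← hsums] at hp
    rw [List.getD_eq_getElem _ _ (by omega), List.getD_eq_getElem _ _ hj]
    exact (List.pairwise_iff_getElem.mp hp) i j (by omega) hj hij
  obtain ⟨r, hre, hrlen, hbelow, habove⟩ :=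
    pvBisectLoop_spec sums m hmono (sums.length + 1) 0 (sums.length : Int)
      (le_refl 0) (by omega) (le_refl _) (by omega)
      (fun j hj => absurd hj (by omega))
      (fun j hj hjl => absurd hjl (by omega))
  have hbelow' : ∀ j : Nat, j < S.length → j < r →
      (S.getD j ((0 : Int), (0 : Int))).1 + (S.getD j ((0 : Int), (0 : Int))).2 < m := by
    intro j hj hjr
    rw [← hgd j hj]; exact hbelow j hjr
  have habove' : r < S.length →
      m ≤ (S.getD r ((0 : Int), (0 : Int))).1 + (S.getD r ((0 : Int), (0 : Int))).2 := by
    intro hr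
    rw [← hgd r hr]; exact habove r (le_refl r) (by omega)
  rw [← pv_find_sorted m L, ← hS,
    pv_find?_of_first m S r (by omega) hbelow' habove']
  simp only [pvFirstAtLeast, hre]
  by_cases hr : r < S.length
  · rw [if_pos (by omega), PySem.List.pyGetD_natCast,
      List.getD_eq_getElem _ _ hr, List.getElem?_eq_getElem hr]
  · rw [if_neg (by omega), List.getElem?_eq_none (by omega)]

theorem assign_eq (elevations : List (List Int)) (path : List (Int × Int)) (capacities : List Int) :
    assign_pony_to_path elevations path capacities
      = assign_pony_to_path_alt elevations path capacities := by
  unfold assign_pony_to_path assign_pony_to_path_alt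
  simp only [PySem.List.foldl_append_singleton_eq_map, List.nil_append,
    PySem.List.slice_from_one, pv_dist_eq, List.map_map]
  apply List.map_congr_left
  intro ab _
  exact (pvFirstAtLeast_sorted _ (ab.2 - ab.1)).symm

-- ===== VERDICT (by name: the statement is the Claim_ definition above) =====
theorem assign_pony_to_path_spec : Claim_equal_assign_pony_to_path := by
  intro elevations path capacities _ _
  unfold Spec_assign_pony_to_path
  exact assign_eq elevations path capacities
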